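-- pv_equiv track=rewrite | github.com/ChizhovYuI/lurii-pfm | scripts/generate_homebrew_formula_resources.py | platform_priority
-- ===== SOURCE A (Python) =====
-- def platform_priority(platform_tag: str) -> int | None:
--     platforms = platform_tag.split(".")
--     if any("macosx" in platform and "arm64" in platform for platform in platforms):
--         return 0
--     if any("macosx" in platform and "universal2" in platform for platform in platforms):
--         return 1
--     if any("macosx" in platform for platform in platforms):
--         return 2
--     return None
-- ===== SOURCE B (Python) =====
-- def platform_priority(platform_tag: str) -> int | None:
--     best = None
--     for frag in platform_tag.split("."):
--         if "macosx" in frag: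
--             rank = 0 if "arm64" in frag else (1 if "universal2" in frag else 2)
--             if best is None or rank < best:
--                 best = rank
--     return best
-- ===== Notes on version B (the rewrite author's own statement) =====
-- stated objective: simpler
-- what changed: Replaces the three separate any()-scans over the fragment list with a single pass that keeps the minimum rank of the macosx fragments seen so far.
import Mathlib
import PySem

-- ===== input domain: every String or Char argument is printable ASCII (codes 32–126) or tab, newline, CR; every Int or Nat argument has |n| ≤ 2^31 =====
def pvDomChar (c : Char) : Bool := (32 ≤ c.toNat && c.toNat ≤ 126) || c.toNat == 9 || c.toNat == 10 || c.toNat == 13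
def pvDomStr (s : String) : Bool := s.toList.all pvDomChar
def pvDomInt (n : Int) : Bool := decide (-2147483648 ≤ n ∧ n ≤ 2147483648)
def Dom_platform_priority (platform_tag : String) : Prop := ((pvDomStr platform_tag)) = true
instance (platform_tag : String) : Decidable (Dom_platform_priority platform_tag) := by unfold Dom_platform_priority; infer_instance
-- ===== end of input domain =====

-- B replaces A's three repeated any()-scans with one fold over the fragments keeping the minimum rank (objective: simpler).


-- ===== PORT A =====
-- platform_tag.split(".") = PySem.Chars.splitOn on the code points (sep ≠ ""); 'in' = PySem.Chars.isIn
def platform_priority (platform_tag : String) : Option Int :=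
  let platforms : List (List Char) := PySem.Chars.splitOn platform_tag.toList ".".toList
  if platforms.any (fun p => PySem.Chars.isIn "macosx".toList p && PySem.Chars.isIn "arm64".toList p) then some 0
  else if platforms.any (fun p => PySem.Chars.isIn "macosx".toList p && PySem.Chars.isIn "universal2".toList p) then some 1
  else if platforms.any (fun p => PySem.Chars.isIn "macosx".toList p) then some 2
  else none

-- ===== PORT B =====
def pvRank (p : List Char) : Int :=
  if PySem.Chars.isIn "arm64".toList p then 0 else if PySem.Chars.isIn "universal2".toList p then 1 else 2

def pvStep (best : Option Int) (p : List Char) : Option Int :=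
  if PySem.Chars.isIn "macosx".toList p then
    match best with
    | none => some (pvRank p)
    | some b => if pvRank p < b then some (pvRank p) else some b
  else best

def platform_priority_alt (platform_tag : String) : Option Int :=
  (PySem.Chars.splitOn platform_tag.toList ".".toList).foldl pvStep none

-- ===== PRECONDITION & SPEC =====
def Spec_platform_priority (platform_tag : String) (out : Option Int) : Prop := out = platform_priority_alt platform_tag
instance (platform_tag : String) (out : Option Int) : Decidable (Spec_platform_priority platform_tag out) := by unfold Spec_platform_priority; infer_instance

-- ===== CLAIM (what is proved, stated in full; the proofs are below) =====
def Claim_equal_platform_priority : Prop := ∀ (platform_tag : String), Dom_platform_priority platform_tag → Spec_platform_priority platform_tag (platform_priority platform_tag)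

-- ===== LEMMAS AND PROOFS =====

-- combine two optional ranks, taking the minimum
def pvComb : Option Int → Option Int → Option Int
  | x, none => x
  | none, some b => some b
  | some a, some b => some (min a b)

theorem pvComb_none_left (x : Option Int) : pvComb none x = x := by
  cases x <;> rfl

theorem pvStep_eq_comb (acc : Option Int) (p : List Char) :
    pvStep acc p = pvComb acc (if PySem.Chars.isIn "macosx".toList p then some (pvRank p) else none) := by
  cases acc <;> by_cases h : PySem.Chars.isIn "macosx".toList p = true <;>
    simp only [pvStep, pvComb, h, if_true, if_false, Bool.false_eq_true, min_def] <;>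
    split_ifs <;> simp_all <;> omega

theorem pvComb_assoc (a b c : Option Int) : pvComb (pvComb a b) c = pvComb a (pvComb b c) := by
  cases a <;> cases b <;> cases c <;> simp [pvComb, min_assoc]

theorem foldl_step_comb (l : List (List Char)) (acc : Option Int) :
    l.foldl pvStep acc = pvComb acc (l.foldl pvStep none) := by
  induction l generalizing acc with
  | nil => cases acc <;> rfl
  | cons p t ih =>
    simp only [List.foldl_cons]
    rw [ih (pvStep acc p), ih (pvStep none p), pvStep_eq_comb, pvStep_eq_comb none,
      pvComb_none_left, pvComb_assoc]

theorem fold_eq_nested (l : List (List Char)) :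
    l.foldl pvStep none =
      (if l.any (fun p => PySem.Chars.isIn "macosx".toList p && PySem.Chars.isIn "arm64".toList p) then some 0
       else if l.any (fun p => PySem.Chars.isIn "macosx".toList p && PySem.Chars.isIn "universal2".toList p) then some 1
       else if l.any (fun p => PySem.Chars.isIn "macosx".toList p) then some 2
       else none) := by
  induction l with
  | nil => rfl
  | cons p t ih =>
    simp only [List.foldl_cons, List.any_cons]
    rw [foldl_step_comb, pvStep_eq_comb, pvComb_none_left, ih]
    by_cases hm : PySem.Chars.isIn "macosx".toList p = true <;>
      by_cases ha : PySem.Chars.isIn "arm64".toList p = true <;>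
      by_cases hu : PySem.Chars.isIn "universal2".toList p = true <;>
      simp only [Bool.not_eq_true] at hm ha hu <;>
      simp only [pvRank, hm, ha, hu, if_true, if_false, Bool.true_and, Bool.false_and,
        Bool.true_or, Bool.false_or, Bool.false_eq_true] <;>
      split_ifs <;> rfl

-- ===== VERDICT (by name: the statement is the Claim_ definition above) =====
theorem platform_priority_spec : Claim_equal_platform_priority := by
  intro t _
  unfold Spec_platform_priority platform_priority platform_priority_alt
  rw [fold_eq_nested]
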